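-- pv_equiv track=rewrite | github.com/RazvanCabalau/Tema1-SDA | Test/test.py | minMaxPositions
-- ===== SOURCE A (Python) =====
-- def minMaxPositions (v, min, max):
--     pozMin = 0
--     pozMax = 0
--     for i in range (len(v)):
--         if min == v[i]:
--             pozMin = i
--         if max == v[i]:
--             pozMax = i
--     return (pozMin, pozMax)
-- ===== SOURCE B (Python) =====
-- def minMaxPositions(v, min, max):
--     pozMin = 0
--     pozMax = 0
--     foundMin = False
--     foundMax = False
--     for i in range(len(v) - 1, -1, -1):
--         if not foundMin and v[i] == min:
--             pozMin = i
--             foundMin = True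
--         if not foundMax and v[i] == max:
--             pozMax = i
--             foundMax = True
--         if foundMin and foundMax:
--             break
--     return (pozMin, pozMax)
-- ===== Notes on version B (the rewrite author's own statement) =====
-- stated objective: alternative
-- what changed: B scans the list backwards with found-flags and breaks as soon as both last positions are known, instead of A's full forward scan that keeps overwriting the positions.
import Mathlib
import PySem

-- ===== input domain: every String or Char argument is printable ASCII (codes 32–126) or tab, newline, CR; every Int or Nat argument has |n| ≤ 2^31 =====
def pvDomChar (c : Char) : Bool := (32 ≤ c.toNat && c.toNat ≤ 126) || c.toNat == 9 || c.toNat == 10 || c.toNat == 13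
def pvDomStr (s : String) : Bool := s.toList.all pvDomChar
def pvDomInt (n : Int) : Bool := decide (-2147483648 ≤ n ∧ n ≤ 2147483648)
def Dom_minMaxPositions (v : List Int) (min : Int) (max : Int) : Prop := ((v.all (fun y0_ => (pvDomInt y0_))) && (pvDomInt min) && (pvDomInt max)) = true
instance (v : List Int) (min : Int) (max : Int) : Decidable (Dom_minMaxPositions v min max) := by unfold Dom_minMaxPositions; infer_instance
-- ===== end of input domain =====

-- B replaces A's full forward scan by a backward scan with found-flags that stops
-- as soon as both last positions are known (objective: alternative decomposition).

-- ===== PORT A =====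
-- A: forward loop over range(len(v)), overwriting pozMin/pozMax on every match.
def minMaxPositions (v : List Int) (min : Int) (max : Int) : Int × Int :=
  (List.range v.length).foldl
    (fun s i =>
      ((if min = v.getD i 0 then (i : Int) else s.1),
       (if max = v.getD i 0 then (i : Int) else s.2)))
    (0, 0)

-- ===== PORT B =====
-- B's loop: index i descending, flags foundMin/foundMax, break when both set.
def minMaxLoop (v : List Int) (mn mx : Int) : Nat → Bool → Int → Bool → Int → Int × Int
  | 0, fm, pm, fM, pM =>
    let pm' := if !fm && (v.getD 0 0 = mn) then (0 : Int) else pm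
    let _fm' := if !fm && (v.getD 0 0 = mn) then true else fm
    let pM' := if !fM && (v.getD 0 0 = mx) then (0 : Int) else pM
    let _fM' := if !fM && (v.getD 0 0 = mx) then true else fM
    (pm', pM')
  | (i+1), fm, pm, fM, pM =>
    let pm' := if !fm && (v.getD (i+1) 0 = mn) then ((i : Int) + 1) else pm
    let fm' := if !fm && (v.getD (i+1) 0 = mn) then true else fm
    let pM' := if !fM && (v.getD (i+1) 0 = mx) then ((i : Int) + 1) else pM
    let fM' := if !fM && (v.getD (i+1) 0 = mx) then true else fM
    if fm' && fM' then (pm', pM')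
    else minMaxLoop v mn mx i fm' pm' fM' pM'

def minMaxPositions_alt (v : List Int) (min : Int) (max : Int) : Int × Int :=
  if v.length = 0 then (0, 0)
  else minMaxLoop v min max (v.length - 1) false 0 false 0

-- ===== PRECONDITION & SPEC =====
def Spec_minMaxPositions (v : List Int) (min : Int) (max : Int) (out : Int × Int) : Prop := out = minMaxPositions_alt v min max
instance (v : List Int) (min : Int) (max : Int) (out : Int × Int) : Decidable (Spec_minMaxPositions v min max out) := by unfold Spec_minMaxPositions; infer_instance

-- ===== CLAIM (what is proved, stated in full; the proofs are below) =====
def Claim_equal_minMaxPositions : Prop := ∀ (v : List Int) (min : Int) (max : Int), Dom_minMaxPositions v min max → Spec_minMaxPositions v min max (minMaxPositions v min max)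

-- ===== LEMMAS AND PROOFS =====

/-- Index of the last occurrence of `x` in `v`, if any. -/
def lastPos? (x : Int) : List Int → Option Nat
  | [] => none
  | a :: t =>
    match lastPos? x t with
    | some j => some (j + 1)
    | none => if a = x then some 0 else none

/-- Index of the last occurrence of `x` among indices `0..i` of `v`, if any. -/
def lastLE? (v : List Int) (x : Int) : Nat → Option Nat
  | 0 => if v.getD 0 0 = x then some 0 else none
  | (i+1) => if v.getD (i+1) 0 = x then some (i+1) else lastLE? v x i

def posVal (o : Option Nat) (d : Int) : Int :=
  match o with
  | some j => (j : Int)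
  | none => d

theorem if_eq_swap {α : Type} (a b : Int) (x y : α) :
    (if a = b then x else y) = (if b = a then x else y) := by
  by_cases h : a = b
  · simp [h]
  · rw [if_neg h, if_neg (fun hh => h hh.symm)]

theorem posVal_some (n : Nat) (d : Int) : posVal (some n) d = (n : Int) := rfl

theorem posVal_none (d : Int) : posVal none d = d := rfl

theorem posVal_ite (c : Prop) [Decidable c] (n : Nat) (o : Option Nat) (d : Int) :
    posVal (if c then some n else o) d = if c then (n : Int) else posVal o d := by
  split_ifs <;> rfl

theorem lastPos?_snoc (x a : Int) (w : List Int) :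
    lastPos? x (w ++ [a]) = if a = x then some w.length else lastPos? x w := by
  induction w with
  | nil => simp [lastPos?]
  | cons b w ih =>
    by_cases h : a = x
    · subst h; simp [lastPos?, ih]
    · simp only [List.cons_append, lastPos?, ih, if_neg h]

theorem lastLE?_take (v : List Int) (x : Int) (i : Nat) (h : i < v.length) :
    lastLE? v x i = lastPos? x (v.take (i+1)) := by
  induction i with
  | zero =>
    cases v with
    | nil => simp at h
    | cons a t => simp [lastLE?, lastPos?]
  | succ i ih =>
    have hi : i < v.length := Nat.lt_of_succ_lt h
    have htake : v.take (i+2) = v.take (i+1) ++ [v.getD (i+1) 0] := by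
      have : v.getD (i+1) 0 = v[i+1]'h := by
        simp [List.getD, List.getElem?_eq_getElem h]
      rw [this]
      exact List.take_succ_eq_append_getElem (by omega)
    rw [lastLE?, htake, lastPos?_snoc]
    have hlen : (v.take (i+1)).length = i + 1 := by simp; omega
    rw [hlen, ih hi]

theorem minMaxPositions_eq (v : List Int) (mn mx : Int) :
    minMaxPositions v mn mx = (posVal (lastPos? mn v) 0, posVal (lastPos? mx v) 0) := by
  induction v using List.reverseRecOn with
  | nil => simp [minMaxPositions, lastPos?, posVal]
  | append_singleton w a ih =>
    unfold minMaxPositions at ih ⊢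
    have hlen : (w ++ [a]).length = w.length + 1 := by simp
    rw [hlen, List.range_succ, List.foldl_append]
    have hcongr :
        (List.range w.length).foldl
          (fun s i =>
            ((if mn = (w ++ [a]).getD i 0 then (i : Int) else s.1),
             (if mx = (w ++ [a]).getD i 0 then (i : Int) else s.2))) (0, 0)
        = (List.range w.length).foldl
          (fun s i =>
            ((if mn = w.getD i 0 then (i : Int) else s.1),
             (if mx = w.getD i 0 then (i : Int) else s.2))) (0, 0) := by
      apply PySem.List.foldl_congr_mem
      intro s i hi
      have hi' : i < w.length := List.mem_range.mp hi
      have : (w ++ [a]).getD i 0 = w.getD i 0 := by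
        simp [List.getD, List.getElem?_append_left hi']
      rw [this]
    rw [hcongr, ih]
    have hget : (w ++ [a]).getD w.length 0 = a := by
      simp [List.getD]
    rw [List.foldl_cons, List.foldl_nil, hget, lastPos?_snoc, lastPos?_snoc,
        posVal_ite, posVal_ite]
    rw [if_eq_swap mn a, if_eq_swap mx a]

theorem minMaxLoop_eq (v : List Int) (mn mx : Int) (i : Nat) (hi : i < v.length) :
    ∀ (fm : Bool) (pm : Int) (fM : Bool) (pM : Int),
    minMaxLoop v mn mx i fm pm fM pM =
      ((if fm then pm else posVal (lastLE? v mn i) pm),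
       (if fM then pM else posVal (lastLE? v mx i) pM)) := by
  induction i with
  | zero =>
    intro fm pm fM pM
    cases fm <;> cases fM <;>
      by_cases h1 : (v[0]?).getD (0 : Int) = mn <;>
        by_cases h2 : (v[0]?).getD (0 : Int) = mx <;>
          simp [minMaxLoop, lastLE?, List.getD, h1, h2, posVal_ite, posVal_some,
                posVal_none] <;>
            (try (split_ifs <;> simp [posVal_some, posVal_none]))
  | succ i ih =>
    intro fm pm fM pM
    have hi' : i < v.length := Nat.lt_of_succ_lt hi
    cases fm <;> cases fM <;>
      by_cases h1 : (v[i+1]?).getD (0 : Int) = mn <;>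
        by_cases h2 : (v[i+1]?).getD (0 : Int) = mx <;>
          simp [minMaxLoop, lastLE?, List.getD, h1, h2, ih hi', posVal_ite,
                posVal_some, posVal_none] <;>
            (try (split_ifs <;> simp [posVal_some, posVal_none]))

theorem minMaxPositions_alt_eq (v : List Int) (mn mx : Int) :
    minMaxPositions_alt v mn mx = (posVal (lastPos? mn v) 0, posVal (lastPos? mx v) 0) := by
  unfold minMaxPositions_alt
  by_cases hv : v.length = 0
  · have : v = [] := List.eq_nil_of_length_eq_zero hv
    simp [hv, this, lastPos?, posVal]
  · have hlt : v.length - 1 < v.length := by omega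
    rw [if_neg hv, minMaxLoop_eq v mn mx _ hlt,
        lastLE?_take v mn _ hlt, lastLE?_take v mx _ hlt]
    have : v.length - 1 + 1 = v.length := by omega
    rw [this, List.take_length]
    simp

-- ===== VERDICT (by name: the statement is the Claim_ definition above) =====
theorem minMaxPositions_spec : Claim_equal_minMaxPositions := by
  intro v mn mx _
  unfold Spec_minMaxPositions
  rw [minMaxPositions_eq, minMaxPositions_alt_eq]
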